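-- pv_equiv track=rewrite | github.com/jasontan656/Otctopus_OS_AgentConsole | 7-Task-runtime-selfcheck/scripts/runtime_pain_repair_exec.py | _preflight_memory_runtime
-- ===== SOURCE A (Python) =====
-- def _extract_flag_value(tokens: list[str], flag: str) -> str:
--     for idx, token in enumerate(tokens):
--         value = str(token or "").strip()
--         if not value:
--             continue
--         if value == flag:
--             return str(tokens[idx + 1] or "").strip() if idx + 1 < len(tokens) else ""
--         if value.partition("=")[0] == flag and "=" in value:
--             return value.partition("=")[2].strip()
--     return ""
--
-- def _preflight_memory_runtime(tokens: list[str], workdir: str | None) -> tuple[bool, str, str]: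
--     del workdir
--     subcommand = str(tokens[2] if len(tokens) > 2 else "").strip().lower()
--     requires_flush_args = subcommand == "pre-compaction-flush"
--     failed_check = next(
--         (
--             (reason_code, detail)
--             for reason_code, detail, failed in [
--                 (
--                     "preflight_missing_required_flag",
--                     "memory_runtime pre-compaction-flush requires --session-id",
--                     bool(requires_flush_args and not _extract_flag_value(tokens, "--session-id")),
--                 ),
--                 (
--                     "preflight_missing_required_flag",
--                     "memory_runtime pre-compaction-flush requires --content",
--                     bool(requires_flush_args and not _extract_flag_value(tokens, "--content")),
--                 ),
--             ]
--             if failed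
--         ),
--         ("", ""),
--     )
--     return {
--         True: (False, failed_check[0], failed_check[1]),
--         False: (True, "", ""),
--     }[bool(failed_check[0])]
-- ===== SOURCE B (Python) =====
-- def _preflight_memory_runtime(tokens: list[str], workdir: str | None) -> tuple[bool, str, str]:
--     del workdir
--     # One pass: map each flag name to its resolved value, first occurrence wins.
--     flags: dict[str, str] = {}
--     n = len(tokens)
--     for i, tok in enumerate(tokens):
--         v = str(tok or "").strip()
--         if not v:
--             continue
--         if "=" in v:
--             key, _, rhs = v.partition("=")
--             val = rhs.strip()
--         else:
--             key = v
--             val = str(tokens[i + 1] or "").strip() if i + 1 < n else ""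
--         if key not in flags:
--             flags[key] = val
--     subcommand = str(tokens[2] if n > 2 else "").strip().lower()
--     if subcommand == "pre-compaction-flush":
--         if not flags.get("--session-id", ""):
--             return (False, "preflight_missing_required_flag",
--                     "memory_runtime pre-compaction-flush requires --session-id")
--         if not flags.get("--content", ""):
--             return (False, "preflight_missing_required_flag",
--                     "memory_runtime pre-compaction-flush requires --content")
--     return (True, "", "")
-- ===== Notes on version B (the rewrite author's own statement) =====
-- stated objective: simpler
-- what changed: Replaces the per-flag rescans (_extract_flag_value called once per required flag) plus the generator/dict-dispatch with a single pass that builds a first-occurrence-wins flag->value map and plain conditionals.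
import Mathlib
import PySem

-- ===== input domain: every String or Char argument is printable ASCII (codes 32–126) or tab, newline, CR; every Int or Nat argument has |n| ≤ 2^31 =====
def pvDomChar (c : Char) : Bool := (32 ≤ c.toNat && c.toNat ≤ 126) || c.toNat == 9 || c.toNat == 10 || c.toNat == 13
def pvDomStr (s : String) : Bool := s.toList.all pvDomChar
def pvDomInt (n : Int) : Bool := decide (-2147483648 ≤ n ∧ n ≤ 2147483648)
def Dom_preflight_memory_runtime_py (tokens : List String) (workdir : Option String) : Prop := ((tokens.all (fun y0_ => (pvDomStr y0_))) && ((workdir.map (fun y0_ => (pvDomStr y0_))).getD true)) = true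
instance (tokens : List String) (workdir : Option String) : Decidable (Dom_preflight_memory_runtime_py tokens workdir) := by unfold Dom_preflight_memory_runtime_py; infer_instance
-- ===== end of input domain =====

-- B replaces A's per-flag rescans and generator/dict-dispatch with one pass building a
-- first-occurrence-wins flag→value map plus plain conditionals (objective: simpler).

-- ===== PORT A =====
-- value.partition("=")[0]  (text before the first '='; exact for the single-char separator "=")
def pvPartEqHead (v : List Char) : List Char := v.takeWhile (· ≠ '=')
-- value.partition("=")[2]  when "=" ∈ value (text after the first '='; exact for the single-char separator)
def pvPartEqTail (v : List Char) : List Char := (v.dropWhile (· ≠ '=')).tail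

-- the loop body of _extract_flag_value: recursion over the token list ('tokens[idx+1]' is the head of the rest)
def extractFlagGo (ts : List String) (flag : List Char) : List Char :=
  match ts with
  | [] => []
  | t :: rest =>
    let v := PySem.Chars.strip t.toList
    if v = [] then extractFlagGo rest flag
    else if v = flag then
      match rest with
      | [] => []
      | nxt :: _ => PySem.Chars.strip nxt.toList
    else if pvPartEqHead v = flag ∧ '=' ∈ v then PySem.Chars.strip (pvPartEqTail v)
    else extractFlagGo rest flag

def preflight_memory_runtime_py (tokens : List String) (workdir : Option String) : Bool × String × String :=
  let _ := workdir  -- del workdir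
  let subcommand := PySem.Chars.lower (PySem.Chars.strip (tokens.getD 2 "").toList)
  let requiresFlushArgs := subcommand = "pre-compaction-flush".toList
  let checks : List (String × String × Bool) :=
    [("preflight_missing_required_flag",
      "memory_runtime pre-compaction-flush requires --session-id",
      requiresFlushArgs ∧ extractFlagGo tokens "--session-id".toList = []),
     ("preflight_missing_required_flag",
      "memory_runtime pre-compaction-flush requires --content",
      requiresFlushArgs ∧ extractFlagGo tokens "--content".toList = [])]
  let failedCheck : String × String :=
    match checks.find? (fun c => c.2.2) with
    | some c => (c.1, c.2.1)
    | none => ("", "")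
  if failedCheck.1 ≠ "" then (false, failedCheck.1, failedCheck.2) else (true, "", "")

-- ===== PORT B =====
-- one pass over the tokens: flag name ↦ resolved value, first occurrence wins
def buildFlags (d : PySem.Dict (List Char) (List Char)) (ts : List String) : PySem.Dict (List Char) (List Char) :=
  match ts with
  | [] => d
  | t :: rest =>
    let v := PySem.Chars.strip t.toList
    if v = [] then buildFlags d rest
    else
      let kv : List Char × List Char :=
        if '=' ∈ v then (pvPartEqHead v, PySem.Chars.strip (pvPartEqTail v))
        else (v, match rest with | [] => [] | nxt :: _ => PySem.Chars.strip nxt.toList)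
      buildFlags (if d.contains kv.1 then d else d.insert kv.1 kv.2) rest

def preflight_memory_runtime_py_alt (tokens : List String) (workdir : Option String) : Bool × String × String :=
  let _ := workdir
  let flags := buildFlags PySem.Dict.empty tokens
  let subcommand := PySem.Chars.lower (PySem.Chars.strip (tokens.getD 2 "").toList)
  if subcommand = "pre-compaction-flush".toList then
    if flags.getD "--session-id".toList [] = [] then
      (false, "preflight_missing_required_flag",
       "memory_runtime pre-compaction-flush requires --session-id")
    else if flags.getD "--content".toList [] = [] then
      (false, "preflight_missing_required_flag",
       "memory_runtime pre-compaction-flush requires --content")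
    else (true, "", "")
  else (true, "", "")

-- ===== PRECONDITION & SPEC =====
def Spec_preflight_memory_runtime_py (tokens : List String) (workdir : Option String) (out : Bool × String × String) : Prop := out = preflight_memory_runtime_py_alt tokens workdir
instance (tokens : List String) (workdir : Option String) (out : Bool × String × String) : Decidable (Spec_preflight_memory_runtime_py tokens workdir out) := by unfold Spec_preflight_memory_runtime_py; infer_instance

-- ===== CLAIM (what is proved, stated in full; the proofs are below) =====
def Claim_equal_preflight_memory_runtime_py : Prop := ∀ (tokens : List String) (workdir : Option String), Dom_preflight_memory_runtime_py tokens workdir → Spec_preflight_memory_runtime_py tokens workdir (preflight_memory_runtime_py tokens workdir)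

-- ===== LEMMAS AND PROOFS =====

-- the map lookup of a flag name without '=' agrees with A's rescan (modulo what the accumulator already holds)
theorem buildFlags_getD (f : List Char) (hf : '=' ∉ f)
    (ts : List String) (d : PySem.Dict (List Char) (List Char)) :
    (buildFlags d ts).getD f [] =
      (if d.contains f then d.getD f [] else extractFlagGo ts f) := by
  induction ts generalizing d with
  | nil =>
    simp only [buildFlags, extractFlagGo]
    split
    · rfl
    · rename_i h
      exact PySem.Dict.getD_of_not_contains d [] (by simpa using h)
  | cons t rest ih =>
    simp only [buildFlags, extractFlagGo]
    set v := PySem.Chars.strip t.toList with hv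
    by_cases hve : v = []
    · simp [hve, ih d]
    · simp only [if_neg hve]
      by_cases heq : '=' ∈ v
      · -- token carries '=': key is the text before it
        have hvne : v ≠ f := fun h => hf (h ▸ heq)
        by_cases hk : pvPartEqHead v = f
        · by_cases hc : d.contains f = true
          · simp [heq, hk, hc, ih]
          · have hc' : d.contains f = false := by simpa using hc
            simp [heq, hvne, hk, hc', ih, PySem.Dict.getD_insert_self]
        · have hfk : f ≠ pvPartEqHead v := fun h => hk h.symm
          by_cases hc : d.contains (pvPartEqHead v) = true
          · simp [heq, hvne, hk, hc, ih]
          · have hc' : d.contains (pvPartEqHead v) = false := by simpa using hc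
            simp [heq, hvne, hk, hc', ih, PySem.Dict.contains_insert,
              PySem.Dict.getD_insert_of_ne _ _ _ hfk, hfk]
      · -- bare flag token: key is the whole token
        have hhead : pvPartEqHead v = v := by
          simp only [pvPartEqHead]
          exact List.takeWhile_eq_self_iff.mpr (by
            intro c hc; simp only [decide_eq_true_eq]; exact fun h => heq (h ▸ hc))
        by_cases hvf : v = f
        · by_cases hc : d.contains f = true
          · simp [hvf, hf, hc, ih]
          · have hc' : d.contains f = false := by simpa using hc
            simp [hvf, hf, hc', ih, PySem.Dict.getD_insert_self]
        · have hfk : f ≠ v := fun h => hvf h.symm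
          by_cases hc : d.contains v = true
          · simp [heq, hvf, hhead, hc, ih]
          · have hc' : d.contains v = false := by simpa using hc
            simp [heq, hvf, hhead, hc', ih, PySem.Dict.contains_insert,
              PySem.Dict.getD_insert_of_ne _ _ _ hfk, hfk]

theorem flags_eq_extract (f : List Char) (hf : '=' ∉ f) (ts : List String) :
    (buildFlags PySem.Dict.empty ts).getD f [] = extractFlagGo ts f := by
  rw [buildFlags_getD f hf ts PySem.Dict.empty]
  simp [PySem.Dict.contains_empty]

-- ===== VERDICT (by name: the statement is the Claim_ definition above) =====
theorem preflight_memory_runtime_py_spec : Claim_equal_preflight_memory_runtime_py := by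
  intro tokens workdir _
  show preflight_memory_runtime_py tokens workdir = preflight_memory_runtime_py_alt tokens workdir
  unfold preflight_memory_runtime_py preflight_memory_runtime_py_alt
  by_cases hsub : PySem.Chars.lower (PySem.Chars.strip (tokens.getD 2 "").toList)
      = "pre-compaction-flush".toList
  · by_cases h1 : extractFlagGo tokens "--session-id".toList = []
    · simp at hsub h1
      simp [List.find?, List.getD, hsub, h1,
        flags_eq_extract ['-','-','s','e','s','s','i','o','n','-','i','d'] (by decide) tokens]
    · by_cases h2 : extractFlagGo tokens "--content".toList = []
      · simp at hsub h1 h2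
        simp [List.find?, List.getD, hsub, h1, h2,
          flags_eq_extract ['-','-','s','e','s','s','i','o','n','-','i','d'] (by decide) tokens,
          flags_eq_extract ['-','-','c','o','n','t','e','n','t'] (by decide) tokens]
      · simp at hsub h1 h2
        simp [List.find?, List.getD, hsub, h1, h2,
          flags_eq_extract ['-','-','s','e','s','s','i','o','n','-','i','d'] (by decide) tokens,
          flags_eq_extract ['-','-','c','o','n','t','e','n','t'] (by decide) tokens]
  · simp at hsub
    simp [List.find?, List.getD, hsub]
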